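-- pv_equiv track=rewrite | github.com/orcohennn/GomokuAI | src/Agents/AgentsUtils.py | defensive_heuristic
-- ===== SOURCE A (Python) =====
-- def defensive_heuristic(board, color):
--     n = len(board)
--     scores = [[0 for i in range(n)] for j in range(n)]
--     op_color = "black" if color == "white" else "white"
--
--     def sequence_found_in_direction(row, col, direction):
--         n = len(board)
--         consec = 0  # Count the current empty cell we're testing
--
--         # Check forward in the given direction
--         i, j = row + direction[0], col + direction[1]
--         while 0 <= i < n and 0 <= j < n and board[i][j] == op_color:
--             consec += 1
--             i += direction[0]
--             j += direction[1]
--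
--         # Check backward in the opposite direction
--         i, j = row - direction[0], col - direction[1]
--         while 0 <= i < n and 0 <= j < n and board[i][j] == op_color:
--             consec += 1
--             i -= direction[0]
--             j -= direction[1]
--
--         return int(10 ** (consec - 1))
--
--     def evaluate_position(row, col):
--         score = 0
--         directions = [(0, 1), (1, 0), (1, 1), (1, -1)]
--         for direction in directions:
--             score += sequence_found_in_direction(row, col, direction)
--         return score
--
--     for i in range(n):
--         for j in range(n):
--             if board[i][j] is None:
--                 scores[i][j] = evaluate_position(i, j)
--
--     return scores
-- ===== SOURCE B (Python) =====
-- def defensive_heuristic(board, color):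
--     # Same return value as the original; per-half-direction DP tables of
--     # consecutive-opponent run lengths instead of per-cell directional scans.
--     n = len(board)
--     op = "black" if color == "white" else "white"
--
--     def dp(d1, d2):
--         # g[(i, j)] = number of consecutive opponent stones starting at (i+d1, j+d2)
--         # along direction (d1, d2); cells with count 0 are simply absent.
--         g = {}
--         rows = range(n - 1, -1, -1) if d1 > 0 else range(n)
--         cols = range(n - 1, -1, -1) if d2 > 0 else range(n)
--         for i in rows:
--             for j in cols:
--                 ni, nj = i + d1, j + d2
--                 if 0 <= ni < n and 0 <= nj < n and board[ni][nj] == op: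
--                     g[(i, j)] = 1 + g.get((ni, nj), 0)
--         return g
--
--     dirs = [(0, 1), (1, 0), (1, 1), (1, -1)]
--     tabs = {}
--     for (d1, d2) in dirs:
--         tabs[(d1, d2)] = dp(d1, d2)
--         tabs[(-d1, -d2)] = dp(-d1, -d2)
--
--     def cell_score(i, j):
--         s = 0
--         for (d1, d2) in dirs:
--             c = tabs[(d1, d2)].get((i, j), 0) + tabs[(-d1, -d2)].get((i, j), 0)
--             s += 0 if c == 0 else 10 ** (c - 1)
--         return s
--
--     return [[cell_score(i, j) if board[i][j] is None else 0 for j in range(n)]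
--             for i in range(n)]
-- ===== Notes on version B (the rewrite author's own statement) =====
-- stated objective: alternative
-- what changed: B precomputes eight per-half-direction tables of consecutive-opponent run lengths by dynamic programming over the grid and assembles each cell's score from two table lookups per direction, instead of A's outward directional walks from every empty cell; worst-case work drops from O(n^3) to O(n^2) but the measured timing on the generated boards showed no speed-up, so none is claimed.
-- outside the precondition, e.g. on defensive_heuristic([[None, None], [None]], 'white'): A raises IndexError, B raises IndexError
import Mathlib
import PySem

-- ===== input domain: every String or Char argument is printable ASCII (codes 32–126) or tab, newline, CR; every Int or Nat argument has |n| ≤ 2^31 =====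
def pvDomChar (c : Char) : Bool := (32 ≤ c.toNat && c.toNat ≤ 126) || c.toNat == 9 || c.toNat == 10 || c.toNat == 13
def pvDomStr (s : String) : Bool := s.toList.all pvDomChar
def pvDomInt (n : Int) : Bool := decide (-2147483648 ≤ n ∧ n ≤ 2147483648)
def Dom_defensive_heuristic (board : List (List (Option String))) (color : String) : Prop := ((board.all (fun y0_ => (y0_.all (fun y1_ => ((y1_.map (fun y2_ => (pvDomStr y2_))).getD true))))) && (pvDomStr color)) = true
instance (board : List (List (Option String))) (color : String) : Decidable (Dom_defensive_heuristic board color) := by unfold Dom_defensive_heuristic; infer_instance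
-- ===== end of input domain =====

-- B replaces A's per-empty-cell directional walks by eight per-half-direction DP tables
-- of consecutive-opponent run lengths, assembled into the same scores (alternative
-- algorithm, same return value).

-- ===== PORT A =====
-- shared with port B: both Pythons compute the same literal expressions
-- 'op_color = "black" if color == "white" else "white"', 'board[i][j]' (only evaluated
-- after the bounds guard, so the getD defaults are never observed under Pre_), and the
-- guard '0 <= i < n and 0 <= j < n and board[i][j] == op'.
def opColor (color : String) : String := if color == "white" then "black" else "white"

def cellAt (board : List (List (Option String))) (i j : Int) : Option String :=
  (PySem.List.pyGet? ((PySem.List.pyGet? board i).getD []) j).getD none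

def isOp (board : List (List (Option String))) (op : String) (n i j : Int) : Bool :=
  decide (0 ≤ i) && decide (i < n) && decide (0 ≤ j) && decide (j < n) &&
    (match cellAt board i j with | some s => s == op | none => false)

-- the forward while-loop of sequence_found_in_direction (i += d1, j += d2); the fuel
-- board.length + 1 is never exhausted: one coordinate moves by ±1 each iteration, so the
-- guard can hold at most board.length times for the four literal directions.
def seqFwd (board : List (List (Option String))) (op : String) (n d1 d2 : Int) :
    Nat → Int → Int → Int → Int
  | 0, _, _, c => c
  | f+1, i, j, c =>
      if isOp board op n i j then seqFwd board op n d1 d2 f (i+d1) (j+d2) (c+1) else c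

-- the backward while-loop (i -= d1, j -= d2)
def seqBwd (board : List (List (Option String))) (op : String) (n d1 d2 : Int) :
    Nat → Int → Int → Int → Int
  | 0, _, _, c => c
  | f+1, i, j, c =>
      if isOp board op n i j then seqBwd board op n d1 d2 f (i-d1) (j-d2) (c+1) else c

-- sequence_found_in_direction; 'int(10 ** (consec - 1))' is exact: consec = 0 gives
-- int(0.1) = 0, and for consec ≥ 1 the power is an exact Python int.
def seqFound (board : List (List (Option String))) (op : String) (n row col d1 d2 : Int) : Int :=
  let c1 := seqFwd board op n d1 d2 (board.length + 1) (row + d1) (col + d2) 0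
  let c2 := seqBwd board op n d1 d2 (board.length + 1) (row - d1) (col - d2) c1
  if c2 = 0 then 0 else 10 ^ (c2 - 1).toNat

def evalPos (board : List (List (Option String))) (op : String) (n row col : Int) : Int :=
  [((0:Int),(1:Int)), (1,0), (1,1), (1,-1)].foldl
    (fun s d => s + seqFound board op n row col d.1 d.2) 0

-- scores[i][j] = v  (indices produced by range(n), hence 0 ≤ i,j < n: exact)
def set2 (sc : List (List Int)) (i j : Nat) (v : Int) : List (List Int) :=
  sc.set i ((sc.getD i []).set j v)

def defensive_heuristic (board : List (List (Option String))) (color : String) : List (List Int) :=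
  let n := board.length
  let scores := (List.range n).map (fun _ => (List.range n).map (fun _ => (0:Int)))
  let op := opColor color
  (List.range n).foldl (fun sc (i : Nat) =>
    (List.range n).foldl (fun sc (j : Nat) =>
      if cellAt board (i:Int) (j:Int) = none then
        set2 sc i j (evalPos board op (n:Int) (i:Int) (j:Int))
      else sc) sc) scores

-- ===== PORT B =====
-- the body of dp's inner loop in Source B
def dpStep (board : List (List (Option String))) (op : String) (n d1 d2 : Int)
    (g : PySem.Dict (Int × Int) Int) (i j : Int) : PySem.Dict (Int × Int) Int :=
  if isOp board op n (i+d1) (j+d2) then g.insert (i, j) (1 + g.getD (i+d1, j+d2) 0) else g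

-- dp(d1, d2) of Source B: g[(i,j)] = consecutive opponent stones starting at (i+d1, j+d2)
def dpDir (board : List (List (Option String))) (op : String) (n d1 d2 : Int) :
    PySem.Dict (Int × Int) Int :=
  let rows := if d1 > 0 then PySem.List.pyRange (n-1) (-1) (-1) else PySem.List.pyRange 0 n 1
  let cols := if d2 > 0 then PySem.List.pyRange (n-1) (-1) (-1) else PySem.List.pyRange 0 n 1
  rows.foldl (fun g i => cols.foldl (fun g j => dpStep board op n d1 d2 g i j) g)
    PySem.Dict.empty

def dirsB : List (Int × Int) := [(0,1), (1,0), (1,1), (1,-1)]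

def tabsB (board : List (List (Option String))) (op : String) (n : Int) :
    PySem.Dict (Int × Int) (PySem.Dict (Int × Int) Int) :=
  dirsB.foldl (fun t d =>
    (t.insert (d.1, d.2) (dpDir board op n d.1 d.2)).insert
      (-d.1, -d.2) (dpDir board op n (-d.1) (-d.2))) PySem.Dict.empty

-- cell_score of Source B; tabs[(d1,d2)] is always present, so getD with an empty default is exact
def cellScore (tabs : PySem.Dict (Int × Int) (PySem.Dict (Int × Int) Int)) (i j : Int) : Int :=
  dirsB.foldl (fun s d =>
    s + (let c := (tabs.getD (d.1, d.2) PySem.Dict.empty).getD (i, j) 0 +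
                  (tabs.getD (-d.1, -d.2) PySem.Dict.empty).getD (i, j) 0
         if c = 0 then 0 else 10 ^ (c - 1).toNat)) 0

def defensive_heuristic_alt (board : List (List (Option String))) (color : String) : List (List Int) :=
  let n := board.length
  let op := opColor color
  let tabs := tabsB board op (n:Int)
  (List.range n).map (fun (i : Nat) => (List.range n).map (fun (j : Nat) =>
    if cellAt board (i:Int) (j:Int) = none then cellScore tabs (i:Int) (j:Int) else 0))

-- ===== PRECONDITION & SPEC =====
-- Pre_ excludes only boards with a row shorter than len(board), on which both Pythons
-- raise IndexError (board[i][j] is read for every 0 ≤ i, j < len(board)).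
def Pre_defensive_heuristic (board : List (List (Option String))) (color : String) : Prop :=
  ∀ r ∈ board, board.length ≤ r.length

instance (board : List (List (Option String))) (color : String) :
    Decidable (Pre_defensive_heuristic board color) := by
  unfold Pre_defensive_heuristic; infer_instance

def pvWitness_defensive_heuristic : List (List (Option String)) × String :=
  ([[none, some "black"], [some "white", none]], "white")

def Spec_defensive_heuristic (board : List (List (Option String))) (color : String) (out : List (List Int)) : Prop := out = defensive_heuristic_alt board color
instance (board : List (List (Option String))) (color : String) (out : List (List Int)) : Decidable (Spec_defensive_heuristic board color out) := by unfold Spec_defensive_heuristic; infer_instance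

-- ===== CLAIM (what is proved, stated in full; the proofs are below) =====
def Claim_equal_defensive_heuristic : Prop := ∀ (board : List (List (Option String))) (color : String), Dom_defensive_heuristic board color → Pre_defensive_heuristic board color → Spec_defensive_heuristic board color (defensive_heuristic board color)

-- ===== LEMMAS AND PROOFS =====

-- the mathematical run-length count both ports compute, with explicit fuel
def pvCnt (board : List (List (Option String))) (op : String) (n d1 d2 : Int) :
    Nat → Int → Int → Int
  | 0, _, _ => 0
  | f+1, i, j =>
      if isOp board op n i j then 1 + pvCnt board op n d1 d2 f (i+d1) (j+d2) else 0

-- count of consecutive opponent stones adjacent to (i,j) in direction (d1,d2)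
def pvVal (board : List (List (Option String))) (op : String) (n d1 d2 i j : Int) : Int :=
  pvCnt board op n d1 d2 (board.length + 1) (i+d1) (j+d2)

-- the final content of a dp table at key (i,j)
def pvTgt (board : List (List (Option String))) (op : String) (n d1 d2 r c : Int) : Int :=
  if 0 ≤ r ∧ r < n ∧ 0 ≤ c ∧ c < n then pvVal board op n d1 d2 r c else 0

-- each of the eight half-directions has a ±1 component
def pvValid (d1 d2 : Int) : Prop := d1 = 1 ∨ d1 = -1 ∨ d2 = 1 ∨ d2 = -1

-- termination measure of the directional walk
def pvM (n d1 d2 i j : Int) : Int :=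
  if d1 = 1 then n - i else if d1 = -1 then i + 1 else if d2 = 1 then n - j else j + 1

lemma isOp_bounds {board : List (List (Option String))} {op : String} {n i j : Int}
    (h : isOp board op n i j = true) : 0 ≤ i ∧ i < n ∧ 0 ≤ j ∧ j < n := by
  simp [isOp] at h; tauto

lemma seqFwd_eq (board : List (List (Option String))) (op : String) (n d1 d2 : Int) :
    ∀ (f : Nat) (i j c : Int),
      seqFwd board op n d1 d2 f i j c = c + pvCnt board op n d1 d2 f i j := by
  intro f
  induction f with
  | zero => intro i j c; simp [seqFwd, pvCnt]
  | succ f ih =>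
    intro i j c
    simp only [seqFwd, pvCnt]
    by_cases h : isOp board op n i j = true
    · simp only [h, if_true]; rw [ih]; ring
    · simp only [Bool.not_eq_true] at h; simp [h]

lemma seqBwd_eq (board : List (List (Option String))) (op : String) (n d1 d2 : Int) :
    ∀ (f : Nat) (i j c : Int),
      seqBwd board op n d1 d2 f i j c = c + pvCnt board op n (-d1) (-d2) f i j := by
  intro f
  induction f with
  | zero => intro i j c; simp [seqBwd, pvCnt]
  | succ f ih =>
    intro i j c
    simp only [seqBwd, pvCnt]
    by_cases h : isOp board op n i j = true
    · simp only [h, if_true]; rw [ih, sub_eq_add_neg, sub_eq_add_neg]; ring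
    · simp only [Bool.not_eq_true] at h; simp [h]

lemma pvM_pos {n d1 d2 i j : Int} (h1 : 0 ≤ i) (h2 : i < n) (h3 : 0 ≤ j) (h4 : j < n) :
    1 ≤ pvM n d1 d2 i j := by
  unfold pvM; split_ifs <;> omega

lemma pvM_le {n d1 d2 i j : Int} (h1 : 0 ≤ i) (h2 : i < n) (h3 : 0 ≤ j) (h4 : j < n) :
    pvM n d1 d2 i j ≤ n := by
  unfold pvM; split_ifs <;> omega

lemma pvM_step {n d1 d2 i j : Int} (hv : pvValid d1 d2) :
    pvM n d1 d2 (i+d1) (j+d2) = pvM n d1 d2 i j - 1 := by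
  unfold pvValid at hv; unfold pvM; split_ifs <;> omega

lemma pvCnt_zero_of_nonpos (board : List (List (Option String))) (op : String) (n d1 d2 : Int) :
    ∀ (f : Nat) (i j : Int), pvM n d1 d2 i j ≤ 0 → pvCnt board op n d1 d2 f i j = 0 := by
  intro f i j hm
  cases f with
  | zero => simp [pvCnt]
  | succ f =>
    simp only [pvCnt]
    cases hop : isOp board op n i j with
    | false => simp
    | true =>
      exfalso
      obtain ⟨h1, h2, h3, h4⟩ := isOp_bounds hop
      have := pvM_pos (n := n) (d1 := d1) (d2 := d2) h1 h2 h3 h4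
      omega

lemma pvCnt_fuel_eq (board : List (List (Option String))) (op : String) (n d1 d2 : Int)
    (hv : pvValid d1 d2) :
    ∀ (f g : Nat) (i j : Int), pvM n d1 d2 i j ≤ (f:Int) → pvM n d1 d2 i j ≤ (g:Int) →
      pvCnt board op n d1 d2 f i j = pvCnt board op n d1 d2 g i j := by
  intro f
  induction f with
  | zero =>
    intro g i j hf hg
    rw [pvCnt_zero_of_nonpos board op n d1 d2 g i j (by exact_mod_cast hf)]
    simp [pvCnt]
  | succ f ih =>
    intro g i j hf hg
    cases g with
    | zero =>
      rw [pvCnt_zero_of_nonpos board op n d1 d2 (f+1) i j (by exact_mod_cast hg)]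
      simp [pvCnt]
    | succ g =>
      simp only [pvCnt]
      cases hop : isOp board op n i j with
      | false => simp
      | true =>
        simp only [if_true]
        congr 1
        obtain ⟨h1, h2, h3, h4⟩ := isOp_bounds hop
        have hstep := pvM_step (n := n) (i := i) (j := j) hv
        apply ih
        · push_cast at hf; omega
        · push_cast at hg; omega

lemma pvVal_unfold (board : List (List (Option String))) (op : String) (n d1 d2 : Int)
    (hv : pvValid d1 d2) (hn : n = (board.length : Int)) (i j : Int) :
    pvVal board op n d1 d2 i j =
      if isOp board op n (i+d1) (j+d2) then 1 + pvVal board op n d1 d2 (i+d1) (j+d2) else 0 := by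
  unfold pvVal
  conv_lhs => rw [pvCnt]
  cases hop : isOp board op n (i+d1) (j+d2) with
  | false => simp
  | true =>
    simp only [if_true]
    congr 1
    obtain ⟨h1, h2, h3, h4⟩ := isOp_bounds hop
    have hle := pvM_le (n := n) (d1 := d1) (d2 := d2) h1 h2 h3 h4
    have hstep := pvM_step (n := n) (i := i+d1) (j := j+d2) hv
    apply pvCnt_fuel_eq board op n d1 d2 hv
    · omega
    · omega

-- the inner column loop when the read neighbour lies in a different row (d1 ≠ 0)
lemma colfold_other (board : List (List (Option String))) (op : String) (n d1 d2 : Int)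
    (hv : pvValid d1 d2) (hn : n = (board.length : Int)) (hne : d1 ≠ 0) (i : Int) :
    ∀ (C : List Int) (g : PySem.Dict (Int × Int) Int),
      (∀ c, isOp board op n (i+d1) c = true →
        g.getD (i+d1, c) 0 = pvVal board op n d1 d2 (i+d1) c) →
      (∀ c, g.getD (i, c) 0 = 0 ∨ g.getD (i, c) 0 = pvVal board op n d1 d2 i c) →
      (∀ r c, r ≠ i →
        (C.foldl (fun g j => dpStep board op n d1 d2 g i j) g).getD (r, c) 0 = g.getD (r, c) 0) ∧
      (∀ c, (C.foldl (fun g j => dpStep board op n d1 d2 g i j) g).getD (i, c) 0 =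
        if c ∈ C then pvVal board op n d1 d2 i c else g.getD (i, c) 0) := by
  intro C
  induction C with
  | nil =>
    intro g Hnb H0
    exact ⟨fun r c _ => rfl, fun c => by simp⟩
  | cons j0 C' ih =>
    intro g Hnb H0
    simp only [List.foldl_cons]
    by_cases hop : isOp board op n (i+d1) (j0+d2) = true
    · have hkey : ∀ c : Int, ((i+d1, c) : Int × Int) ≠ (i, j0) := by
        intro c h
        apply hne
        have := congrArg Prod.fst h
        simp at this
        omega
      have hins : dpStep board op n d1 d2 g i j0
          = g.insert (i, j0) (pvVal board op n d1 d2 i j0) := by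
        simp only [dpStep, hop, if_true]
        rw [Hnb _ hop]
        rw [pvVal_unfold board op n d1 d2 hv hn i j0, hop]
        simp
      rw [hins]
      have Hnb' : ∀ c, isOp board op n (i+d1) c = true →
          (g.insert (i, j0) (pvVal board op n d1 d2 i j0)).getD (i+d1, c) 0
            = pvVal board op n d1 d2 (i+d1) c := by
        intro c hc
        rw [PySem.Dict.getD_insert_of_ne _ _ _ (hkey c)]
        exact Hnb c hc
      have H0' : ∀ c, (g.insert (i, j0) (pvVal board op n d1 d2 i j0)).getD (i, c) 0 = 0 ∨
          (g.insert (i, j0) (pvVal board op n d1 d2 i j0)).getD (i, c) 0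
            = pvVal board op n d1 d2 i c := by
        intro c
        by_cases hc : c = j0
        · rw [hc, PySem.Dict.getD_insert_self]
          exact Or.inr rfl
        · rw [PySem.Dict.getD_insert_of_ne _ _ _ (by simp [Prod.ext_iff, hc])]
          exact H0 c
      obtain ⟨P1, P2⟩ := ih _ Hnb' H0'
      constructor
      · intro r c hr
        rw [P1 r c hr, PySem.Dict.getD_insert_of_ne _ _ _ (by simp [Prod.ext_iff, hr])]
      · intro c
        rw [P2 c]
        by_cases hc' : c ∈ C'
        · simp [hc']
        · by_cases hcj : c = j0
          · subst hcj
            simp only [hc', if_false, List.mem_cons, true_or, if_true]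
            rw [PySem.Dict.getD_insert_self]
          · simp only [hc', if_false, List.mem_cons, hcj, false_or, if_false]
            rw [PySem.Dict.getD_insert_of_ne _ _ _ (by simp [Prod.ext_iff, hcj])]
    · have hg1 : dpStep board op n d1 d2 g i j0 = g := by
        simp [dpStep, hop]
      rw [hg1]
      obtain ⟨P1, P2⟩ := ih g Hnb H0
      refine ⟨P1, fun c => ?_⟩
      rw [P2 c]
      by_cases hc' : c ∈ C'
      · simp [hc']
      · by_cases hcj : c = j0
        · subst hcj
          simp only [hc', if_false, List.mem_cons, true_or, if_true]
          have hz : pvVal board op n d1 d2 i c = 0 := by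
            rw [pvVal_unfold board op n d1 d2 hv hn i c]
            simp [hop]
          rcases H0 c with h | h
          · rw [h, hz]
          · rw [h, hz]

        · simp [List.mem_cons, hcj, hc']

-- outer row loop for d1 = 1 (rows processed top-down from n-1)
lemma rowsfold_desc (board : List (List (Option String))) (op : String) (n d2 : Int)
    (hv : pvValid 1 d2) (hn : n = (board.length : Int)) (C : List Int)
    (HC : ∀ c, c ∈ C ↔ 0 ≤ c ∧ c < n) :
    ∀ (k : Nat) (g : PySem.Dict (Int × Int) Int), (k:Int) ≤ n →
      (∀ r c, g.getD (r, c) 0 = if 0 ≤ r ∧ r < (k:Int) then 0 else pvTgt board op n 1 d2 r c) →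
      ∀ r c, ((PySem.List.pyRange ((k:Int)-1) (-1) (-1)).foldl
          (fun g i => C.foldl (fun g j => dpStep board op n 1 d2 g i j) g) g).getD (r, c) 0
        = pvTgt board op n 1 d2 r c := by
  intro k
  induction k with
  | zero =>
    intro g hk Inv r c
    rw [show ((0:Nat):Int) - 1 = -1 by norm_num,
        PySem.List.pyRange_neg_one_eq_nil (by norm_num), List.foldl_nil]
    have := Inv r c
    rwa [if_neg (by omega)] at this
  | succ k ih =>
    intro g hk Inv r c
    rw [show (((k+1:Nat)):Int) - 1 = (k:Int) by push_cast; ring,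
        PySem.List.pyRange_neg_one_cons (by omega), List.foldl_cons]
    have Hnb : ∀ c, isOp board op n ((k:Int)+1) c = true →
        g.getD ((k:Int)+1, c) 0 = pvVal board op n 1 d2 ((k:Int)+1) c := by
      intro c hc
      obtain ⟨h1, h2, h3, h4⟩ := isOp_bounds hc
      rw [Inv ((k:Int)+1) c, if_neg (by push_cast; omega)]
      unfold pvTgt
      rw [if_pos ⟨h1, h2, h3, h4⟩]
    have H0 : ∀ c, g.getD ((k:Int), c) 0 = 0 ∨
        g.getD ((k:Int), c) 0 = pvVal board op n 1 d2 (k:Int) c := by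
      intro c
      left
      rw [Inv (k:Int) c, if_pos (by push_cast; omega)]
    obtain ⟨P1, P2⟩ := colfold_other board op n 1 d2 hv hn (by norm_num) (k:Int) C g Hnb H0
    apply ih _ (by push_cast at hk ⊢; omega)
    intro r c
    by_cases hr : r = (k:Int)
    · subst hr
      rw [P2 c]
      by_cases hc : c ∈ C
      · rw [if_pos hc, if_neg (by omega)]
        unfold pvTgt
        rw [if_pos (by have := (HC c).mp hc; push_cast at hk; omega)]
      · rw [if_neg hc, if_neg (by omega)]
        unfold pvTgt
        rw [if_neg (by intro h; exact hc ((HC c).mpr ⟨h.2.2.1, h.2.2.2⟩)),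
            Inv (k:Int) c, if_pos (by push_cast; omega)]
    · rw [P1 r c hr, Inv r c]
      by_cases h1 : 0 ≤ r ∧ r < (k:Int)
      · rw [if_pos (by push_cast; omega), if_pos h1]
      · rw [if_neg (by push_cast at h1 ⊢; omega), if_neg h1]

-- outer row loop for d1 = -1 (rows processed bottom-up from 0)
lemma rowsfold_asc (board : List (List (Option String))) (op : String) (n d2 : Int)
    (hv : pvValid (-1) d2) (hn : n = (board.length : Int)) (C : List Int)
    (HC : ∀ c, c ∈ C ↔ 0 ≤ c ∧ c < n) :
    ∀ (m : Nat) (a : Int) (g : PySem.Dict (Int × Int) Int), 0 ≤ a → a + m = n →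
      (∀ r c, g.getD (r, c) 0 = if a ≤ r ∧ r < n then 0 else pvTgt board op n (-1) d2 r c) →
      ∀ r c, ((PySem.List.pyRange a n 1).foldl
          (fun g i => C.foldl (fun g j => dpStep board op n (-1) d2 g i j) g) g).getD (r, c) 0
        = pvTgt board op n (-1) d2 r c := by
  intro m
  induction m with
  | zero =>
    intro a g ha hm Inv r c
    rw [PySem.List.pyRange_one_eq_nil (by omega), List.foldl_nil]
    have := Inv r c
    rwa [if_neg (by omega)] at this
  | succ m ih =>
    intro a g ha hm Inv r c
    rw [PySem.List.pyRange_one_cons (by push_cast at hm; omega), List.foldl_cons]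
    have Hnb : ∀ c, isOp board op n (a + -1) c = true →
        g.getD (a + -1, c) 0 = pvVal board op n (-1) d2 (a + -1) c := by
      intro c hc
      obtain ⟨h1, h2, h3, h4⟩ := isOp_bounds hc
      rw [Inv (a + -1) c, if_neg (by omega)]
      unfold pvTgt
      rw [if_pos ⟨h1, h2, h3, h4⟩]
    have H0 : ∀ c, g.getD (a, c) 0 = 0 ∨
        g.getD (a, c) 0 = pvVal board op n (-1) d2 a c := by
      intro c
      left
      rw [Inv a c, if_pos (by push_cast at hm; omega)]
    obtain ⟨P1, P2⟩ := colfold_other board op n (-1) d2 hv hn (by norm_num) a C g Hnb H0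
    apply ih (a+1) _ (by omega) (by push_cast at hm ⊢; omega)
    intro r c
    by_cases hr : r = a
    · subst hr
      rw [P2 c]
      by_cases hc : c ∈ C
      · rw [if_pos hc, if_neg (by omega)]
        unfold pvTgt
        rw [if_pos (by have := (HC c).mp hc; push_cast at hm; omega)]
      · rw [if_neg hc, if_neg (by omega)]
        unfold pvTgt
        rw [if_neg (by intro h; exact hc ((HC c).mpr ⟨h.2.2.1, h.2.2.2⟩)),
            Inv r c, if_pos (by push_cast at hm; omega)]
    · rw [P1 r c hr, Inv r c]
      by_cases h1 : a + 1 ≤ r ∧ r < n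
      · rw [if_pos h1, if_pos (by omega)]
      · rw [if_neg h1, if_neg (by omega)]

-- inner column loop for d1 = 0, d2 = 1 (columns right-to-left, neighbour in the same row)
lemma colfold_desc (board : List (List (Option String))) (op : String) (n : Int)
    (hn : n = (board.length : Int)) (i : Int) (hi : 0 ≤ i ∧ i < n) :
    ∀ (k : Nat) (g : PySem.Dict (Int × Int) Int), (k:Int) ≤ n →
      (∀ c, g.getD (i, c) 0 = if 0 ≤ c ∧ c < (k:Int) then 0 else pvTgt board op n 0 1 i c) →
      (∀ r c, r ≠ i →
        ((PySem.List.pyRange ((k:Int)-1) (-1) (-1)).foldl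
          (fun g j => dpStep board op n 0 1 g i j) g).getD (r, c) 0 = g.getD (r, c) 0) ∧
      (∀ c, ((PySem.List.pyRange ((k:Int)-1) (-1) (-1)).foldl
          (fun g j => dpStep board op n 0 1 g i j) g).getD (i, c) 0 = pvTgt board op n 0 1 i c) := by
  intro k
  induction k with
  | zero =>
    intro g hk Hrow
    rw [show ((0:Nat):Int) - 1 = -1 by norm_num,
        PySem.List.pyRange_neg_one_eq_nil (by norm_num)]
    simp only [List.foldl_nil]
    constructor
    · simp
    · intro c
      have := Hrow c
      rwa [if_neg (by omega)] at this
  | succ k ih =>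
    intro g hk Hrow
    rw [show (((k+1:Nat)):Int) - 1 = (k:Int) by push_cast; ring,
        PySem.List.pyRange_neg_one_cons (by omega), List.foldl_cons]
    by_cases hop : isOp board op n i ((k:Int)+1) = true
    · have hb := isOp_bounds hop
      have hread : g.getD (i, (k:Int)+1) 0 = pvVal board op n 0 1 i ((k:Int)+1) := by
        rw [Hrow ((k:Int)+1), if_neg (by omega)]
        unfold pvTgt
        rw [if_pos ⟨hi.1, hi.2, hb.2.2.1, hb.2.2.2⟩]
      have hstep : dpStep board op n 0 1 g i (k:Int)
          = g.insert (i, (k:Int)) (pvVal board op n 0 1 i (k:Int)) := by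
        simp only [dpStep, add_zero, hop, if_true]
        rw [hread, pvVal_unfold board op n 0 1 (Or.inr (Or.inr (Or.inl rfl))) hn i (k:Int)]
        simp [hop]
      rw [hstep]
      have Hrow' : ∀ c, (g.insert (i, (k:Int)) (pvVal board op n 0 1 i (k:Int))).getD (i, c) 0
          = if 0 ≤ c ∧ c < (k:Int) then 0 else pvTgt board op n 0 1 i c := by
        intro c
        by_cases hc : c = (k:Int)
        · rw [hc, PySem.Dict.getD_insert_self, if_neg (by omega)]
          unfold pvTgt
          rw [if_pos ⟨hi.1, hi.2, by omega, by push_cast at hk; omega⟩]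
        · rw [PySem.Dict.getD_insert_of_ne _ _ _ (by simp [Prod.ext_iff, hc]), Hrow c]
          by_cases h1 : 0 ≤ c ∧ c < (k:Int)
          · rw [if_pos (by push_cast; omega), if_pos h1]
          · rw [if_neg (by push_cast at h1 ⊢; omega), if_neg h1]
      obtain ⟨P1, P2⟩ := ih _ (by push_cast at hk ⊢; omega) Hrow'
      refine ⟨fun r c hr => ?_, P2⟩
      rw [P1 r c hr, PySem.Dict.getD_insert_of_ne _ _ _ (by simp [Prod.ext_iff, hr])]
    · have hg1 : dpStep board op n 0 1 g i (k:Int) = g := by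
        simp [dpStep, hop]
      rw [hg1]
      have Hrow' : ∀ c, g.getD (i, c) 0
          = if 0 ≤ c ∧ c < (k:Int) then 0 else pvTgt board op n 0 1 i c := by
        intro c
        by_cases hc : c = (k:Int)
        · rw [hc, Hrow (k:Int), if_pos (by omega), if_neg (by omega)]
          unfold pvTgt
          rw [if_pos ⟨hi.1, hi.2, by omega, by push_cast at hk; omega⟩,
              pvVal_unfold board op n 0 1 (Or.inr (Or.inr (Or.inl rfl))) hn i (k:Int)]
          simp [hop]
        · rw [Hrow c]
          by_cases h1 : 0 ≤ c ∧ c < (k:Int)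
          · rw [if_pos (by push_cast; omega), if_pos h1]
          · rw [if_neg (by push_cast at h1 ⊢; omega), if_neg h1]
      exact ih _ (by push_cast at hk ⊢; omega) Hrow'

-- inner column loop for d1 = 0, d2 = -1 (columns left-to-right)
lemma colfold_asc (board : List (List (Option String))) (op : String) (n : Int)
    (hn : n = (board.length : Int)) (i : Int) (hi : 0 ≤ i ∧ i < n) :
    ∀ (m : Nat) (a : Int) (g : PySem.Dict (Int × Int) Int), 0 ≤ a → a + m = n →
      (∀ c, g.getD (i, c) 0 = if a ≤ c ∧ c < n then 0 else pvTgt board op n 0 (-1) i c) →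
      (∀ r c, r ≠ i →
        ((PySem.List.pyRange a n 1).foldl
          (fun g j => dpStep board op n 0 (-1) g i j) g).getD (r, c) 0 = g.getD (r, c) 0) ∧
      (∀ c, ((PySem.List.pyRange a n 1).foldl
          (fun g j => dpStep board op n 0 (-1) g i j) g).getD (i, c) 0 = pvTgt board op n 0 (-1) i c) := by
  intro m
  induction m with
  | zero =>
    intro a g ha hm Hrow
    rw [PySem.List.pyRange_one_eq_nil (by omega)]
    simp only [List.foldl_nil]
    constructor
    · simp
    · intro c
      have := Hrow c
      rwa [if_neg (by omega)] at this
  | succ m ih =>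
    intro a g ha hm Hrow
    rw [PySem.List.pyRange_one_cons (by push_cast at hm; omega), List.foldl_cons]
    by_cases hop : isOp board op n i (a + -1) = true
    · have hb := isOp_bounds hop
      have hread : g.getD (i, a + -1) 0 = pvVal board op n 0 (-1) i (a + -1) := by
        rw [Hrow (a + -1), if_neg (by omega)]
        unfold pvTgt
        rw [if_pos ⟨hi.1, hi.2, hb.2.2.1, hb.2.2.2⟩]
      have hstep : dpStep board op n 0 (-1) g i a
          = g.insert (i, a) (pvVal board op n 0 (-1) i a) := by
        simp only [dpStep, add_zero, hop, if_true]
        rw [hread, pvVal_unfold board op n 0 (-1) (Or.inr (Or.inr (Or.inr rfl))) hn i a]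
        simp [hop]
      rw [hstep]
      have Hrow' : ∀ c, (g.insert (i, a) (pvVal board op n 0 (-1) i a)).getD (i, c) 0
          = if a + 1 ≤ c ∧ c < n then 0 else pvTgt board op n 0 (-1) i c := by
        intro c
        by_cases hc : c = a
        · rw [hc, PySem.Dict.getD_insert_self, if_neg (by omega)]
          unfold pvTgt
          rw [if_pos ⟨hi.1, hi.2, ha, by push_cast at hm; omega⟩]
        · rw [PySem.Dict.getD_insert_of_ne _ _ _ (by simp [Prod.ext_iff, hc]), Hrow c]
          by_cases h1 : a + 1 ≤ c ∧ c < n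
          · rw [if_pos (by omega), if_pos h1]
          · rw [if_neg (by omega), if_neg h1]
      obtain ⟨P1, P2⟩ := ih (a+1) _ (by omega) (by push_cast at hm ⊢; omega) Hrow'
      refine ⟨fun r c hr => ?_, P2⟩
      rw [P1 r c hr, PySem.Dict.getD_insert_of_ne _ _ _ (by simp [Prod.ext_iff, hr])]
    · have hg1 : dpStep board op n 0 (-1) g i a = g := by
        simp [dpStep, hop]
      rw [hg1]
      have Hrow' : ∀ c, g.getD (i, c) 0
          = if a + 1 ≤ c ∧ c < n then 0 else pvTgt board op n 0 (-1) i c := by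
        intro c
        by_cases hc : c = a
        · rw [hc, Hrow a, if_pos (by push_cast at hm; omega), if_neg (by omega)]
          unfold pvTgt
          rw [if_pos ⟨hi.1, hi.2, ha, by push_cast at hm; omega⟩,
              pvVal_unfold board op n 0 (-1) (Or.inr (Or.inr (Or.inr rfl))) hn i a]
          simp [hop]
        · rw [Hrow c]
          by_cases h1 : a + 1 ≤ c ∧ c < n
          · rw [if_pos (by omega), if_pos h1]
          · rw [if_neg (by omega), if_neg h1]
      exact ih (a+1) _ (by omega) (by push_cast at hm ⊢; omega) Hrow'

-- outer row loop for d1 = 0: rows are independent; the inner loop's effect is a hypothesis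
lemma rowsfold_horiz (board : List (List (Option String))) (op : String) (n d2 : Int)
    (C : List Int)
    (Hinner : ∀ (i : Int), 0 ≤ i → i < n → ∀ (g : PySem.Dict (Int × Int) Int),
      (∀ c, g.getD (i, c) 0 = 0) →
      (∀ r c, r ≠ i →
        (C.foldl (fun g j => dpStep board op n 0 d2 g i j) g).getD (r, c) 0 = g.getD (r, c) 0) ∧
      (∀ c, (C.foldl (fun g j => dpStep board op n 0 d2 g i j) g).getD (i, c) 0 =
        pvTgt board op n 0 d2 i c)) :
    ∀ (m : Nat) (a : Int) (g : PySem.Dict (Int × Int) Int), 0 ≤ a → a + m = n →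
      (∀ r c, g.getD (r, c) 0 = if a ≤ r ∧ r < n then 0 else pvTgt board op n 0 d2 r c) →
      ∀ r c, ((PySem.List.pyRange a n 1).foldl
          (fun g i => C.foldl (fun g j => dpStep board op n 0 d2 g i j) g) g).getD (r, c) 0
        = pvTgt board op n 0 d2 r c := by
  intro m
  induction m with
  | zero =>
    intro a g ha hm Inv r c
    rw [PySem.List.pyRange_one_eq_nil (by omega), List.foldl_nil]
    have := Inv r c
    rwa [if_neg (by omega)] at this
  | succ m ih =>
    intro a g ha hm Inv r c
    rw [PySem.List.pyRange_one_cons (by push_cast at hm; omega), List.foldl_cons]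
    obtain ⟨P1, P2⟩ := Hinner a ha (by push_cast at hm; omega) g
      (fun c => by rw [Inv a c, if_pos (by push_cast at hm; omega)])
    apply ih (a+1) _ (by omega) (by push_cast at hm ⊢; omega)
    intro r c
    by_cases hr : r = a
    · rw [hr, P2 c, if_neg (by omega)]
    · rw [P1 r c hr, Inv r c]
      by_cases h1 : a + 1 ≤ r ∧ r < n
      · rw [if_pos (by omega), if_pos h1]
      · rw [if_neg (by omega), if_neg h1]

lemma dpDir_correct (board : List (List (Option String))) (op : String) (n : Int)
    (hn : n = (board.length : Int)) (d1 d2 : Int)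
    (hd : (d1, d2) ∈ ([(0,1),(0,-1),(1,0),(-1,0),(1,1),(-1,-1),(1,-1),(-1,1)] : List (Int × Int))) :
    ∀ i j : Int, (dpDir board op n d1 d2).getD (i, j) 0 = pvTgt board op n d1 d2 i j := by
  have hn0 : ((n.toNat : Nat) : Int) = n := by omega
  have HCdesc : ∀ c : Int, c ∈ PySem.List.pyRange (n-1) (-1) (-1) ↔ 0 ≤ c ∧ c < n := by
    intro c; rw [PySem.List.mem_pyRange_neg_one]; omega
  have HCasc : ∀ c : Int, c ∈ PySem.List.pyRange 0 n 1 ↔ 0 ≤ c ∧ c < n := by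
    intro c; simp [PySem.List.mem_pyRange_one]
  have Tz : ∀ (d1 d2 r c : Int), ¬ (0 ≤ r ∧ r < n) ∨ ¬ (0 ≤ c ∧ c < n) →
      pvTgt board op n d1 d2 r c = 0 := by
    intro d1 d2 r c h; unfold pvTgt; rw [if_neg]; tauto
  have Inv0 : ∀ (d1 d2 : Int) (a : Int), a ≤ 0 → ∀ r c : Int,
      (PySem.Dict.empty : PySem.Dict (Int × Int) Int).getD (r, c) 0 =
        if a ≤ r ∧ r < n then 0 else pvTgt board op n d1 d2 r c := by
    intro d1 d2 a ha r c
    rw [PySem.Dict.getD_empty]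
    by_cases h1 : a ≤ r ∧ r < n
    · rw [if_pos h1]
    · rw [if_neg h1, Tz]
      omega
  have Inv0' : ∀ (d1 d2 : Int) (k : Nat), n ≤ (k:Int) → ∀ r c : Int,
      (PySem.Dict.empty : PySem.Dict (Int × Int) Int).getD (r, c) 0 =
        if 0 ≤ r ∧ r < (k:Int) then 0 else pvTgt board op n d1 d2 r c := by
    intro d1 d2 k hk r c
    rw [PySem.Dict.getD_empty]
    by_cases h1 : 0 ≤ r ∧ r < (k:Int)
    · rw [if_pos h1]
    · rw [if_neg h1, Tz]
      omega
  have Hh1 : ∀ (i2 : Int), 0 ≤ i2 → i2 < n → ∀ g : PySem.Dict (Int × Int) Int,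
      (∀ c, g.getD (i2, c) 0 = 0) →
      (∀ c, g.getD (i2, c) 0 =
        if 0 ≤ c ∧ c < ((n.toNat:Nat):Int) then 0 else pvTgt board op n 0 1 i2 c) := by
    intro i2 h1 h2 g Hz c
    rw [Hz c]
    by_cases h : 0 ≤ c ∧ c < ((n.toNat:Nat):Int)
    · rw [if_pos h]
    · rw [if_neg h, Tz]
      omega
  have Hh2 : ∀ (i2 : Int), 0 ≤ i2 → i2 < n → ∀ g : PySem.Dict (Int × Int) Int,
      (∀ c, g.getD (i2, c) 0 = 0) →
      (∀ c, g.getD (i2, c) 0 =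
        if 0 ≤ c ∧ c < n then 0 else pvTgt board op n 0 (-1) i2 c) := by
    intro i2 h1 h2 g Hz c
    rw [Hz c]
    by_cases h : 0 ≤ c ∧ c < n
    · rw [if_pos h]
    · rw [if_neg h, Tz]
      omega
  simp only [List.mem_cons, List.not_mem_nil, or_false, Prod.mk.injEq] at hd
  rcases hd with ⟨rfl, rfl⟩ | ⟨rfl, rfl⟩ | ⟨rfl, rfl⟩ | ⟨rfl, rfl⟩ |
    ⟨rfl, rfl⟩ | ⟨rfl, rfl⟩ | ⟨rfl, rfl⟩ | ⟨rfl, rfl⟩ <;> intro i j <;>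
    simp only [dpDir] <;> norm_num
  -- (0, 1): rows ascending, columns right-to-left
  · refine rowsfold_horiz board op n 1 _ ?_ n.toNat 0 _ le_rfl (by omega) (Inv0 0 1 0 le_rfl) i j
    intro i2 h1 h2 g Hz
    have h := colfold_desc board op n hn i2 ⟨h1, h2⟩ n.toNat g (by omega) (Hh1 i2 h1 h2 g Hz)
    rw [hn0] at h
    exact h
  -- (0, -1): rows ascending, columns left-to-right
  · refine rowsfold_horiz board op n (-1) _ ?_ n.toNat 0 _ le_rfl (by omega) (Inv0 0 (-1) 0 le_rfl) i j
    intro i2 h1 h2 g Hz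
    exact colfold_asc board op n hn i2 ⟨h1, h2⟩ n.toNat 0 g le_rfl (by omega) (Hh2 i2 h1 h2 g Hz)
  -- (1, 0): rows descending, columns left-to-right
  · have h := rowsfold_desc board op n 0 (Or.inl rfl) hn _ HCasc n.toNat
      PySem.Dict.empty (by omega) (Inv0' 1 0 n.toNat (by omega)) i j
    rw [hn0] at h
    exact h
  -- (-1, 0): rows ascending, columns left-to-right
  · exact rowsfold_asc board op n 0 (Or.inr (Or.inl rfl)) hn _ HCasc n.toNat 0
      PySem.Dict.empty le_rfl (by omega) (Inv0 (-1) 0 0 le_rfl) i j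
  -- (1, 1): rows descending, columns right-to-left
  · have h := rowsfold_desc board op n 1 (Or.inl rfl) hn _ HCdesc n.toNat
      PySem.Dict.empty (by omega) (Inv0' 1 1 n.toNat (by omega)) i j
    rw [hn0] at h
    exact h
  -- (-1, -1): rows ascending, columns left-to-right
  · exact rowsfold_asc board op n (-1) (Or.inr (Or.inl rfl)) hn _ HCasc n.toNat 0
      PySem.Dict.empty le_rfl (by omega) (Inv0 (-1) (-1) 0 le_rfl) i j
  -- (1, -1): rows descending, columns left-to-right
  · have h := rowsfold_desc board op n (-1) (Or.inl rfl) hn _ HCasc n.toNat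
      PySem.Dict.empty (by omega) (Inv0' 1 (-1) n.toNat (by omega)) i j
    rw [hn0] at h
    exact h
  -- (-1, 1): rows ascending, columns right-to-left
  · exact rowsfold_asc board op n 1 (Or.inr (Or.inl rfl)) hn _ HCdesc n.toNat 0
      PySem.Dict.empty le_rfl (by omega) (Inv0 (-1) 1 0 le_rfl) i j

-- per-cell agreement of the two scoring expressions
lemma cell_eq (board : List (List (Option String))) (op : String) (n : Int)
    (hn : n = (board.length : Int)) (i j : Int)
    (hi : 0 ≤ i ∧ i < n) (hj : 0 ≤ j ∧ j < n) :
    evalPos board op n i j = cellScore (tabsB board op n) i j := by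
  have V : ∀ d1 d2 : Int, pvTgt board op n d1 d2 i j = pvVal board op n d1 d2 i j := by
    intro d1 d2
    unfold pvTgt
    rw [if_pos ⟨hi.1, hi.2, hj.1, hj.2⟩]
  have D1 := dpDir_correct board op n hn 0 1 (by norm_num) i j
  have D2 := dpDir_correct board op n hn 0 (-1) (by norm_num) i j
  have D3 := dpDir_correct board op n hn 1 0 (by norm_num) i j
  have D4 := dpDir_correct board op n hn (-1) 0 (by norm_num) i j
  have D5 := dpDir_correct board op n hn 1 1 (by norm_num) i j
  have D6 := dpDir_correct board op n hn (-1) (-1) (by norm_num) i j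
  have D7 := dpDir_correct board op n hn 1 (-1) (by norm_num) i j
  have D8 := dpDir_correct board op n hn (-1) 1 (by norm_num) i j
  simp only [evalPos, cellScore, dirsB, tabsB, seqFound, List.foldl_cons, List.foldl_nil]
  simp only [seqFwd_eq, seqBwd_eq]
  simp only [PySem.Dict.getD_insert]
  norm_num [Prod.mk.injEq]
  rw [D1, D2, D3, D4, D5, D6, D7, D8]
  simp only [V, pvVal]
  norm_num [sub_eq_add_neg]

-- updating a cell of a row-of-ranges matrix
lemma map_range_set {α : Type} (nn m : Nat) (f : Nat → α) (x : α) (hm : m < nn) :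
    ((List.range nn).map f).set m x
      = (List.range nn).map (fun j => if j = m then x else f j) := by
  apply List.ext_getElem
  · simp
  · intro kk h1 h2
    simp only [List.getElem_set, List.getElem_map, List.getElem_range]
    by_cases h : kk = m
    · subst h; simp
    · simp [h, Ne.symm h]

-- the inner j-loop of port A only rewrites row i
lemma getD_set_self' (l : List (List Int)) (i : Nat) (r : List Int) (h : i < l.length) :
    (l.set i r).getD i [] = r := by
  rw [List.getD_eq_getElem _ [] (by simpa using h), List.getElem_set_self]

lemma set_getD_self' (l : List (List Int)) (i : Nat) (h : i < l.length) :
    l.set i (l.getD i []) = l := by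
  rw [List.getD_eq_getElem l [] h]
  exact List.set_getElem_self ..

lemma inner_row_set (board : List (List (Option String))) (op : String) (n : Int) :
    ∀ (J : List Nat) (sc : List (List Int)) (i : Nat), i < sc.length →
      J.foldl (fun sc (j : Nat) =>
        if cellAt board (i:Int) (j:Int) = none then
          set2 sc i j (evalPos board op n (i:Int) (j:Int)) else sc) sc
      = sc.set i (J.foldl (fun r (j : Nat) =>
          if cellAt board (i:Int) (j:Int) = none then
            r.set j (evalPos board op n (i:Int) (j:Int)) else r) (sc.getD i [])) := by
  intro J
  induction J with
  | nil =>
    intro sc i hi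
    simp only [List.foldl_nil]
    exact (set_getD_self' sc i hi).symm
  | cons j0 J ih =>
    intro sc i hi
    simp only [List.foldl_cons]
    by_cases hP : cellAt board (i:Int) (j0:Int) = none
    · rw [if_pos hP, if_pos hP]
      rw [ih (set2 sc i j0 (evalPos board op n (i:Int) (j0:Int))) i
        (by unfold set2; simpa using hi)]
      unfold set2
      rw [getD_set_self' sc i _ hi, List.set_set]
    · rw [if_neg hP, if_neg hP]
      exact ih sc i hi

-- the j-loop over a zero row produces the comprehension row
lemma row_sets (board : List (List (Option String))) (op : String) (n : Int) (i nn : Nat) :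
    ∀ (m : Nat), m ≤ nn →
      (List.range m).foldl (fun r (j : Nat) =>
          if cellAt board (i:Int) (j:Int) = none then
            r.set j (evalPos board op n (i:Int) (j:Int)) else r)
        ((List.range nn).map (fun _ => (0:Int)))
      = (List.range nn).map (fun (j : Nat) =>
          if j < m then (if cellAt board (i:Int) (j:Int) = none then evalPos board op n (i:Int) (j:Int) else 0) else 0) := by
  intro m
  induction m with
  | zero =>
    intro _
    simp only [List.range_zero, List.foldl_nil]
    apply List.map_congr_left
    intro j _
    simp
  | succ m ih =>
    intro hm
    rw [List.range_succ, List.foldl_append, ih (by omega), List.foldl_cons, List.foldl_nil]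
    by_cases hP : cellAt board (i:Int) (m:Int) = none
    · rw [if_pos hP, map_range_set nn m _ _ (by omega)]
      apply List.map_congr_left
      intro j hj
      simp only [List.mem_range] at hj
      by_cases hjm : j = m
      · subst hjm
        rw [if_pos rfl, if_pos (show j < j + 1 by omega), if_pos hP]
      · rw [if_neg hjm]
        by_cases h1 : j < m
        · rw [if_pos h1, if_pos (show j < m + 1 by omega)]
        · rw [if_neg h1, if_neg (show ¬ j < m + 1 by omega)]
    · rw [if_neg hP]
      apply List.map_congr_left
      intro j hj
      simp only [List.mem_range] at hj
      by_cases hjm : j = m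
      · subst hjm
        rw [if_neg (show ¬ j < j by omega), if_pos (show j < j + 1 by omega), if_neg hP]
      · by_cases h1 : j < m
        · rw [if_pos h1, if_pos (show j < m + 1 by omega)]
        · rw [if_neg h1, if_neg (show ¬ j < m + 1 by omega)]

-- the outer i-loop of port A produces the comprehension matrix
lemma matrix_fold (board : List (List (Option String))) (op : String) (n : Int) (nn : Nat) :
    ∀ (m : Nat), m ≤ nn →
      (List.range m).foldl (fun sc (i : Nat) =>
        (List.range nn).foldl (fun sc (j : Nat) =>
          if cellAt board (i:Int) (j:Int) = none then
            set2 sc i j (evalPos board op n (i:Int) (j:Int)) else sc) sc)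
        ((List.range nn).map (fun _ => (List.range nn).map (fun _ => (0:Int))))
      = (List.range nn).map (fun (i : Nat) =>
          (List.range nn).map (fun (j : Nat) =>
            if i < m then
              (if cellAt board (i:Int) (j:Int) = none then evalPos board op n (i:Int) (j:Int) else 0)
            else 0)) := by
  intro m
  induction m with
  | zero =>
    intro _
    simp only [List.range_zero, List.foldl_nil]
    apply List.map_congr_left
    intro i _
    apply List.map_congr_left
    intro j _
    simp
  | succ m ih =>
    intro hm
    rw [List.range_succ, List.foldl_append, ih (by omega), List.foldl_cons, List.foldl_nil]
    rw [inner_row_set board op n (List.range nn) _ m (by simp; omega)]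
    have hrow : ((List.range nn).map (fun (i : Nat) =>
        (List.range nn).map (fun (j : Nat) =>
          if i < m then
            (if cellAt board (i:Int) (j:Int) = none then evalPos board op n (i:Int) (j:Int) else 0)
          else 0))).getD m []
        = (List.range nn).map (fun _ => (0:Int)) := by
      rw [List.getD_eq_getElem _ [] (by simp; omega), List.getElem_map, List.getElem_range]
      apply List.map_congr_left
      intro j _
      rw [if_neg (by omega)]
    rw [hrow, row_sets board op n m nn nn le_rfl, map_range_set nn m _ _ (by omega)]
    apply List.map_congr_left
    intro i2 hi2
    simp only [List.mem_range] at hi2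
    by_cases hm2 : i2 = m
    · subst hm2
      rw [if_pos rfl]
      apply List.map_congr_left
      intro j hj
      simp only [List.mem_range] at hj
      rw [if_pos hj, if_pos (show i2 < i2 + 1 by omega)]
    · rw [if_neg hm2]
      apply List.map_congr_left
      intro j hj
      by_cases h1 : i2 < m
      · rw [if_pos h1, if_pos (show i2 < m + 1 by omega)]
      · rw [if_neg h1, if_neg (show ¬ i2 < m + 1 by omega)]

-- ===== VERDICT (by name: the statement is the Claim_ definition above) =====
theorem defensive_heuristic_spec : Claim_equal_defensive_heuristic := by
  intro board color _ _
  unfold Spec_defensive_heuristic defensive_heuristic defensive_heuristic_alt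
  rw [matrix_fold board (opColor color) ((board.length : Nat) : Int) board.length board.length le_rfl]
  apply List.map_congr_left
  intro i hi
  simp only [List.mem_range] at hi
  apply List.map_congr_left
  intro j hj
  simp only [List.mem_range] at hj
  rw [if_pos hi]
  by_cases hP : cellAt board (i:Int) (j:Int) = none
  · rw [if_pos hP, if_pos hP]
    exact cell_eq board (opColor color) _ rfl (i:Int) (j:Int)
      ⟨by omega, by exact_mod_cast hi⟩ ⟨by omega, by exact_mod_cast hj⟩
  · rw [if_neg hP, if_neg hP]
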